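-- pv_equiv track=rewrite | github.com/hachira/algbootcamp2020 | lab20-5/lab.py | init_st
-- ===== SOURCE A (Python) =====
-- def init_st(st, r, s, e, n):
-- 	if s == e:
-- 		if 1 <= s and s <= n: st[r] = 1
-- 		else: st[r] = 0
-- 		return st[r]
-- 	c = (s+e)//2
-- 	st[r] = init_st(st, r*2, s, c, n) + init_st(st, r*2+1, c+1, e, n)
-- 	return st[r]
-- ===== SOURCE B (Python) =====
-- # B: closed form for the number of integers in [s,e] that lie in [1,n].
-- # Return-value equivalence only: A also writes subtree counts into st (a dict);
-- # B does not mutate st.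
-- def init_st(st, r, s, e, n):
--     return max(0, min(e, n) - max(s, 1) + 1)
-- ===== Notes on version B (the rewrite author's own statement) =====
-- stated objective: simpler
-- what changed: Replaces the recursive leaf-by-leaf segment-tree build with the closed-form overlap count max(0, min(e,n) - max(s,1) + 1); B does not mutate st (return-value equivalence).
import Mathlib
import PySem

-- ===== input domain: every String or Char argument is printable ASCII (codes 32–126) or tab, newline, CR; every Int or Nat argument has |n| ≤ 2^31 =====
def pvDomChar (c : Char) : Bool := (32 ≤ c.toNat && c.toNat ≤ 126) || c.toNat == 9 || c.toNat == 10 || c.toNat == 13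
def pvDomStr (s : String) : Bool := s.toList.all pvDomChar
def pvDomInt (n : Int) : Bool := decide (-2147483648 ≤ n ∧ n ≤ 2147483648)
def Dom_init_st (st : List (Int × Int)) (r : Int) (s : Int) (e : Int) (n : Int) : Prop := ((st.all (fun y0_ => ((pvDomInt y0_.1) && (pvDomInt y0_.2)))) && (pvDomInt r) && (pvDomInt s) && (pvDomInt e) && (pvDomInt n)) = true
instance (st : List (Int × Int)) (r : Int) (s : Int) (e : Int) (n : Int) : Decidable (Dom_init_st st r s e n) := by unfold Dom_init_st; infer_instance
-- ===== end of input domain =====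

-- B replaces the recursive segment-tree build with the closed-form overlap count; return-value
-- equivalence only (A also writes subtree counts into the dict st, B does not mutate st).

-- ===== PORT A =====
-- Literal transliteration of A's recursion, carrying the dict st; fuel only makes the
-- recursion total (it is never exhausted when s ≤ e, see init_st_go_eq below).
def init_st_go : Nat → PySem.Dict Int Int → Int → Int → Int → Int → PySem.Dict Int Int × Int
  | 0, st, _, _, _, _ => (st, 0)
  | fuel+1, st, r, s, e, n =>
    if s = e then
      let v : Int := if 1 ≤ s ∧ s ≤ n then 1 else 0
      let st' := st.insert r v
      (st', st'.getD r 0)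
    else
      let c := PySem.Int.floordiv (s + e) 2
      let p1 := init_st_go fuel st (r * 2) s c n
      let p2 := init_st_go fuel p1.1 (r * 2 + 1) (c + 1) e n
      let st' := p2.1.insert r (p1.2 + p2.2)
      (st', st'.getD r 0)

def init_st (st : List (Int × Int)) (r : Int) (s : Int) (e : Int) (n : Int) : Int :=
  (init_st_go ((e - s).toNat + 1) (PySem.Dict.mk st) r s e n).2

-- ===== PORT B =====
def init_st_alt (st : List (Int × Int)) (r : Int) (s : Int) (e : Int) (n : Int) : Int :=
  max 0 (min e n - max s 1 + 1)

-- ===== PRECONDITION & SPEC =====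
-- Pre_ excludes only s > e, on which Python A recurses forever on an empty range and raises RecursionError.
def Pre_init_st (st : List (Int × Int)) (r : Int) (s : Int) (e : Int) (n : Int) : Prop := s ≤ e
instance (st : List (Int × Int)) (r : Int) (s : Int) (e : Int) (n : Int) : Decidable (Pre_init_st st r s e n) := by unfold Pre_init_st; infer_instance
def pvWitness_init_st : (List (Int × Int)) × Int × Int × Int × Int := ([], 1, 1, 10, 6)

def Spec_init_st (st : List (Int × Int)) (r : Int) (s : Int) (e : Int) (n : Int) (out : Int) : Prop := out = init_st_alt st r s e n
instance (st : List (Int × Int)) (r : Int) (s : Int) (e : Int) (n : Int) (out : Int) : Decidable (Spec_init_st st r s e n out) := by unfold Spec_init_st; infer_instance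

-- ===== CLAIM (what is proved, stated in full; the proofs are below) =====
def Claim_equal_init_st : Prop := ∀ (st : List (Int × Int)) (r : Int) (s : Int) (e : Int) (n : Int), Dom_init_st st r s e n → Pre_init_st st r s e n → Spec_init_st st r s e n (init_st st r s e n)

-- ===== LEMMAS AND PROOFS =====
theorem init_st_go_eq (fuel : Nat) (st : PySem.Dict Int Int) (r s e n : Int)
    (hse : s ≤ e) (hfuel : (e - s).toNat < fuel) :
    (init_st_go fuel st r s e n).2 = max 0 (min e n - max s 1 + 1) := by
  induction fuel generalizing st r s e with
  | zero => omega
  | succ fuel ih =>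
    by_cases h : s = e
    · subst h
      simp only [init_st_go, PySem.Dict.getD_insert_self]
      split_ifs with h1 <;> omega
    · have hlt : s < e := lt_of_le_of_ne hse h
      have hc : PySem.Int.floordiv (s + e) 2 = (s + e) / 2 :=
        PySem.Int.floordiv_eq_ediv_of_pos (by norm_num)
      simp only [init_st_go, if_neg h, PySem.Dict.getD_insert_self]
      rw [ih _ _ _ _ (by rw [hc]; omega) (by rw [hc]; omega),
          ih _ _ _ _ (by rw [hc]; omega) (by rw [hc]; omega)]
      rw [hc]; omega

-- ===== VERDICT (by name: the statement is the Claim_ definition above) =====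
theorem init_st_spec : Claim_equal_init_st := by
  intro st r s e n _ hpre
  show init_st st r s e n = init_st_alt st r s e n
  unfold init_st init_st_alt
  exact init_st_go_eq _ _ _ _ _ _ hpre (Nat.lt_succ_self _)
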